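-- pv_equiv track=rewrite | github.com/vainillaGlasses/intro2code | tareas/proyecto1.py | suma_ArMoon
-- ===== SOURCE A (Python) =====
-- def suma_ArMoon(sumando1, sumando2):
--     """ Suma dos sumandos decimales en ArMoon
--         Entrada:
--             sumando1 y sumando2
--         Salidas:
--             resultado de la sumar ArMoon en decimal
--         Restricciones:
--             las entradas son enteros postivo
--     """
--     ## Restriciones
--     assert isinstance(sumando1, int) and sumando1 >= 0
--     assert isinstance(sumando2, int) and sumando2 >= 0
--
--     ## Ciclo para obtener la concatenación del resultado de la sumas
--     resultado = ""
--     while sumando1 or sumando2: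
--         result = ((sumando1 % 64) + (sumando2 % 64)) % 64
--         result = bin(result)
--         i, s = 2, ""
--         while i <= len(result)-1:
--             s += result[i]
--             i += 1
--         resultado = s.zfill(6) + resultado
--         sumando1 //= 64
--         sumando2 //= 64
--     resultado = resultado if str(resultado).isdigit() else "000000"
--     return int(resultado, 2)
-- ===== SOURCE B (Python) =====
-- def suma_ArMoon(sumando1, sumando2):
--     """Carry-less digitwise base-64 addition, result read as base-2 of 6-bit chunks.
--     Since 2**6 == 64, the 6-bit chunk at position i has weight 64**i, so we
--     accumulate an integer directly instead of building a binary string."""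
--     assert isinstance(sumando1, int) and sumando1 >= 0
--     assert isinstance(sumando2, int) and sumando2 >= 0
--     resultado = 0
--     power = 1
--     while sumando1 or sumando2:
--         resultado += ((sumando1 % 64) + (sumando2 % 64)) % 64 * power
--         power *= 64
--         sumando1 //= 64
--         sumando2 //= 64
--     return resultado
-- ===== Notes on version B (the rewrite author's own statement) =====
-- stated objective: simpler
-- what changed: B keeps an integer accumulator with a 64^i place value per digit instead of A's per-digit binary-string encode (bin, prefix-strip loop, zfill) followed by an int(...,2) reparse, so no strings are built at all.
import Mathlib
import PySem

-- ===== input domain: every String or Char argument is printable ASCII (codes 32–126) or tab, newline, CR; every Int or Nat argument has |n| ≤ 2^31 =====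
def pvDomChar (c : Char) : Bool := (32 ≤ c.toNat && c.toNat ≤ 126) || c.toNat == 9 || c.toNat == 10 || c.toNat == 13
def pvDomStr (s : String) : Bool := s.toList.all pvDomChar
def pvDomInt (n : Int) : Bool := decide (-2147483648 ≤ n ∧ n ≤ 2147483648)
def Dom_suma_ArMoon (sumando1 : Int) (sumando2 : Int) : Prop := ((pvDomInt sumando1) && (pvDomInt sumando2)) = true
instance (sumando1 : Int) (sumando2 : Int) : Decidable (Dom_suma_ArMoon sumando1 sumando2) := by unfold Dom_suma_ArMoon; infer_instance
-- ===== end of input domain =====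

-- B keeps an integer accumulator with a 64^i place value per base-64 digit instead of
-- A's per-digit binary-string encode (bin / prefix-strip loop / zfill / concatenation)
-- and final int(..., 2) reparse; objective: simpler.

-- ===== PORT A =====
-- Python bin(n) digit part for n > 0: binary digits MSB first (empty for n = 0;
-- bin(0) = "0b0" is handled in pvBin).
def pvBinCore (n : Nat) : List Char :=
  if h : n = 0 then []
  else pvBinCore (n / 2) ++ [if n % 2 = 1 then '1' else '0']
decreasing_by exact Nat.div_lt_self (Nat.pos_of_ne_zero h) (by norm_num)

-- Python bin(n) for n ≥ 0, as a char list (exact for nonnegative n).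
def pvBin (n : Nat) : List Char := ['0', 'b'] ++ (if n = 0 then ['0'] else pvBinCore n)

-- the inner "while i <= len(result)-1: s += result[i]; i += 1" loop of A
def pvInner (result : List Char) (i : Nat) (s : List Char) : List Char :=
  if i ≤ result.length - 1 then pvInner result (i + 1) (s ++ [result.getD i ' '])
  else s
termination_by result.length + 1 - i
decreasing_by omega

-- s.zfill(6) (exact here: s holds only digit chars, no sign)
def pvZfill6 (s : List Char) : List Char := List.replicate (6 - s.length) '0' ++ s

-- str.isdigit (exact on the ASCII strings reaching it here)
def pvIsdigit (l : List Char) : Bool := !l.isEmpty && l.all (fun c => '0' ≤ c && c ≤ '9')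

-- int(resultado, 2) (exact on the '0'/'1' strings reaching it here)
def pvParse2 (l : List Char) : Nat := l.foldl (fun acc c => 2 * acc + (c.toNat - 48)) 0

-- A's outer while loop (operands nonnegative under Pre_, so Nat / and % match Python)
def pvLoopA (s1 s2 : Nat) (resultado : List Char) : List Char :=
  if s1 ≠ 0 ∨ s2 ≠ 0 then
    let result := ((s1 % 64) + (s2 % 64)) % 64
    let r := pvBin result
    let s := pvInner r 2 []
    pvLoopA (s1 / 64) (s2 / 64) (pvZfill6 s ++ resultado)
  else resultado
termination_by s1 + s2
decreasing_by
  rename_i h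
  rcases h with h | h
  · have := Nat.div_lt_self (Nat.pos_of_ne_zero h) (by norm_num : 1 < 64)
    have := Nat.div_le_self s2 64; omega
  · have := Nat.div_lt_self (Nat.pos_of_ne_zero h) (by norm_num : 1 < 64)
    have := Nat.div_le_self s1 64; omega

def suma_ArMoon (sumando1 : Int) (sumando2 : Int) : Int :=
  let resultado := pvLoopA sumando1.toNat sumando2.toNat []
  let resultado := if pvIsdigit resultado then resultado else ['0','0','0','0','0','0']
  (pvParse2 resultado : Int)

-- ===== PORT B =====
def pvLoopB (s1 s2 resultado power : Nat) : Nat :=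
  if s1 ≠ 0 ∨ s2 ≠ 0 then
    pvLoopB (s1 / 64) (s2 / 64) (resultado + ((s1 % 64) + (s2 % 64)) % 64 * power) (power * 64)
  else resultado
termination_by s1 + s2
decreasing_by
  rename_i h
  rcases h with h | h
  · have := Nat.div_lt_self (Nat.pos_of_ne_zero h) (by norm_num : 1 < 64)
    have := Nat.div_le_self s2 64; omega
  · have := Nat.div_lt_self (Nat.pos_of_ne_zero h) (by norm_num : 1 < 64)
    have := Nat.div_le_self s1 64; omega

def suma_ArMoon_alt (sumando1 : Int) (sumando2 : Int) : Int :=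
  (pvLoopB sumando1.toNat sumando2.toNat 0 1 : Nat)

-- ===== PRECONDITION & SPEC =====
-- A's asserts raise AssertionError on negative inputs; Pre_ excludes exactly those.
def Pre_suma_ArMoon (sumando1 : Int) (sumando2 : Int) : Prop := 0 ≤ sumando1 ∧ 0 ≤ sumando2
instance (sumando1 : Int) (sumando2 : Int) : Decidable (Pre_suma_ArMoon sumando1 sumando2) := by
  unfold Pre_suma_ArMoon; infer_instance
def pvWitness_suma_ArMoon : Int × Int := (73, 200)

def Spec_suma_ArMoon (sumando1 : Int) (sumando2 : Int) (out : Int) : Prop := out = suma_ArMoon_alt sumando1 sumando2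
instance (sumando1 : Int) (sumando2 : Int) (out : Int) : Decidable (Spec_suma_ArMoon sumando1 sumando2 out) := by unfold Spec_suma_ArMoon; infer_instance

-- ===== CLAIM (what is proved, stated in full; the proofs are below) =====
def Claim_equal_suma_ArMoon : Prop := ∀ (sumando1 : Int) (sumando2 : Int), Dom_suma_ArMoon sumando1 sumando2 → Pre_suma_ArMoon sumando1 sumando2 → Spec_suma_ArMoon sumando1 sumando2 (suma_ArMoon sumando1 sumando2)

-- ===== LEMMAS AND PROOFS =====

-- the sequence of 6-bit chunks A builds, MSB-chunk first
def pvChunks (s1 s2 : Nat) : List Char :=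
  if s1 ≠ 0 ∨ s2 ≠ 0 then
    pvChunks (s1 / 64) (s2 / 64) ++ pvZfill6 (pvInner (pvBin (((s1 % 64) + (s2 % 64)) % 64)) 2 [])
  else []
termination_by s1 + s2
decreasing_by
  rename_i h
  rcases h with h | h
  · have := Nat.div_lt_self (Nat.pos_of_ne_zero h) (by norm_num : 1 < 64)
    have := Nat.div_le_self s2 64; omega
  · have := Nat.div_lt_self (Nat.pos_of_ne_zero h) (by norm_num : 1 < 64)
    have := Nat.div_le_self s1 64; omega

lemma pvLoopA_chunks (s1 s2 : Nat) (acc : List Char) :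
    pvLoopA s1 s2 acc = pvChunks s1 s2 ++ acc := by
  fun_induction pvLoopA s1 s2 acc with
  | case1 s1 s2 acc h result r s ih =>
      rw [pvChunks, if_pos h, ih]; simp [result, r, s]
  | case2 s1 s2 acc h =>
      rw [pvChunks, if_neg h]; simp

lemma pvParse2_shift (l : List Char) (a : Nat) :
    l.foldl (fun acc c => 2 * acc + (c.toNat - 48)) a = a * 2 ^ l.length + pvParse2 l := by
  induction l generalizing a with
  | nil => simp [pvParse2]
  | cons c l ih =>
      simp only [List.foldl_cons, List.length_cons, pvParse2]
      rw [ih, ih (2 * 0 + (c.toNat - 48))]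
      ring

lemma pvParse2_append (s t : List Char) :
    pvParse2 (s ++ t) = pvParse2 s * 2 ^ t.length + pvParse2 t := by
  simp only [pvParse2, List.foldl_append]
  rw [pvParse2_shift t (List.foldl _ 0 s)]; rfl

lemma pvParse2_replicate_zero (k : Nat) : pvParse2 (List.replicate k '0') = 0 := by
  induction k with
  | zero => simp [pvParse2]
  | succ k ih => simpa [pvParse2, List.replicate_succ] using ih

lemma pvParse2_zfill6 (s : List Char) : pvParse2 (pvZfill6 s) = pvParse2 s := by
  rw [pvZfill6, pvParse2_append, pvParse2_replicate_zero]; ring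

lemma pvBinCore_parse (n : Nat) : pvParse2 (pvBinCore n) = n := by
  fun_induction pvBinCore n with
  | case1 => simp [pvParse2]
  | case2 n h ih =>
      rw [pvParse2_append, ih]
      have := Nat.div_add_mod n 2
      have h2 : n % 2 < 2 := Nat.mod_lt _ (by norm_num)
      by_cases hm : n % 2 = 1 <;> simp [pvParse2, hm] <;> omega

lemma pvBinCore_len (n : Nat) : ∀ k, n < 2 ^ k → (pvBinCore n).length ≤ k := by
  fun_induction pvBinCore n with
  | case1 => intro k _; simp
  | case2 n h ih =>
      intro k hk
      cases k with
      | zero => simp at hk; omega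
      | succ k' =>
          have : n / 2 < 2 ^ k' := by
            rw [Nat.div_lt_iff_lt_mul (by norm_num : 0 < 2)]
            calc n < 2 ^ (k' + 1) := hk
              _ = 2 ^ k' * 2 := by ring
          have := ih k' this
          simp only [List.length_append, List.length_singleton]
          omega

lemma pvBinCore_bin (n : Nat) : ∀ c ∈ pvBinCore n, c = '0' ∨ c = '1' := by
  fun_induction pvBinCore n with
  | case1 => simp
  | case2 n h ih =>
      intro c hc
      rcases List.mem_append.mp hc with hc | hc
      · exact ih c hc
      · simp at hc; split at hc <;> simp [hc]

lemma pvInner_eq (result : List Char) (h : 0 < result.length) :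
    ∀ i s, pvInner result i s = s ++ result.drop i := by
  intro i s
  fun_induction pvInner result i s with
  | case1 i s hle ih =>
      rw [ih]
      have hi : i < result.length := by omega
      rw [List.drop_eq_getElem_cons hi, List.getD_eq_getElem _ _ hi]
      simp
  | case2 i s hle =>
      have hge : result.length ≤ i := by omega
      simp [List.drop_eq_nil_of_le hge]

-- the chunk built for digit d, for d < 64: parses back to d, has length 6, chars binary
lemma pvChunk_spec (d : Nat) (hd : d < 64) :
    pvParse2 (pvZfill6 (pvInner (pvBin d) 2 [])) = d ∧
    (pvZfill6 (pvInner (pvBin d) 2 [])).length = 6 ∧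
    (∀ c ∈ pvZfill6 (pvInner (pvBin d) 2 []), c = '0' ∨ c = '1') := by
  have hlen : 0 < (pvBin d).length := by simp [pvBin]
  have hdrop : pvInner (pvBin d) 2 [] = (if d = 0 then ['0'] else pvBinCore d) := by
    rw [pvInner_eq _ hlen]; simp [pvBin]
  set body := (if d = 0 then ['0'] else pvBinCore d) with hbody
  have hblen : body.length ≤ 6 := by
    by_cases h0 : d = 0
    · simp [hbody, h0]
    · simpa [hbody, h0] using pvBinCore_len d 6 (by omega)
  refine ⟨?_, ?_, ?_⟩
  · rw [hdrop, pvParse2_zfill6]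
    by_cases h0 : d = 0
    · simp [hbody, h0, pvParse2]
    · simpa [hbody, h0] using pvBinCore_parse d
  · rw [hdrop]; simp only [pvZfill6, List.length_append, List.length_replicate]
    omega
  · rw [hdrop]
    intro c hc
    rcases List.mem_append.mp hc with hc | hc
    · left; exact List.eq_of_mem_replicate hc
    · by_cases h0 : d = 0
      · simp [hbody, h0] at hc; simp [hc]
      · exact pvBinCore_bin d c (by simpa [hbody, h0] using hc)

lemma pvChunks_bin (s1 s2 : Nat) : ∀ c ∈ pvChunks s1 s2, c = '0' ∨ c = '1' := by
  fun_induction pvChunks s1 s2 with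
  | case1 s1 s2 h ih =>
      intro c hc
      rcases List.mem_append.mp hc with hc | hc
      · exact ih c hc
      · exact (pvChunk_spec _ (Nat.mod_lt _ (by norm_num))).2.2 c hc
  | case2 => simp

lemma pvChunks_ne_nil (s1 s2 : Nat) (h : s1 ≠ 0 ∨ s2 ≠ 0) : pvChunks s1 s2 ≠ [] := by
  rw [pvChunks, if_pos h]
  intro hcontra
  have h6 := (pvChunk_spec (((s1 % 64) + (s2 % 64)) % 64) (Nat.mod_lt _ (by norm_num))).2.1
  have hlen := congrArg List.length hcontra
  rw [List.length_append, h6] at hlen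
  simp at hlen

lemma pvLoopB_eq (s1 s2 r p : Nat) :
    pvLoopB s1 s2 r p = r + p * pvParse2 (pvChunks s1 s2) := by
  fun_induction pvLoopB s1 s2 r p with
  | case1 s1 s2 r p h ih =>
      rw [ih]
      conv_rhs => rw [pvChunks]
      rw [if_pos h, pvParse2_append]
      obtain ⟨hp, hl, _⟩ := pvChunk_spec (((s1 % 64) + (s2 % 64)) % 64) (Nat.mod_lt _ (by norm_num))
      rw [hp, hl]
      ring
  | case2 s1 s2 r p h =>
      rw [pvChunks, if_neg h]
      simp [pvParse2]

theorem suma_ArMoon_spec : Claim_equal_suma_ArMoon := by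
  intro s1 s2 _ _
  unfold Spec_suma_ArMoon suma_ArMoon suma_ArMoon_alt
  simp only [pvLoopA_chunks, List.append_nil]
  by_cases h : s1.toNat ≠ 0 ∨ s2.toNat ≠ 0
  · have hne := pvChunks_ne_nil s1.toNat s2.toNat h
    have hbin := pvChunks_bin s1.toNat s2.toNat
    have hdig : pvIsdigit (pvChunks s1.toNat s2.toNat) = true := by
      unfold pvIsdigit
      rw [Bool.and_eq_true]
      constructor
      · simpa using hne
      · rw [List.all_eq_true]
        intro c hc
        rcases hbin c hc with rfl | rfl <;> decide
    rw [if_pos hdig, pvLoopB_eq]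
    simp
  · rw [not_or, not_not, not_not] at h
    obtain ⟨ha, hb⟩ := h
    rw [ha, hb, pvChunks, pvLoopB]
    decide
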